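-- pv_equiv track=rewrite | github.com/tez3998/nand2tetris-2nd-ed | projects/06/Parser.py | __has_dest
-- ===== SOURCE A (Python) =====
-- def __has_dest(line, start=0) -> bool:
--     COMP_TERMINATORS = [' ', '\t', ';', '/'] # compの終わりを示す字
--     s = line[start:]
--
--     for ci, ch in enumerate(s):
--         if ch == '=':
--             return True
--
--         if ch in COMP_TERMINATORS: # compが終了
--             return False
--
--     return False
-- ===== SOURCE B (Python) =====
-- def __has_dest(line, start=0) -> bool:
--     s = line[start:]
--     eq = s.find('=')
--     if eq == -1:
--         return False
--     term = -1
--     for c in (' ', '\t', ';', '/'):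
--         p = s.find(c)
--         if p != -1 and (term == -1 or p < term):
--             term = p
--     return term == -1 or eq < term
-- ===== Notes on version B (the rewrite author's own statement) =====
-- stated objective: faster
-- what changed: A's early-exit character-by-character scan is replaced by positional comparison: the find position of the equals sign versus the minimum find position over the four terminators (ignoring absent ones).
import Mathlib
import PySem

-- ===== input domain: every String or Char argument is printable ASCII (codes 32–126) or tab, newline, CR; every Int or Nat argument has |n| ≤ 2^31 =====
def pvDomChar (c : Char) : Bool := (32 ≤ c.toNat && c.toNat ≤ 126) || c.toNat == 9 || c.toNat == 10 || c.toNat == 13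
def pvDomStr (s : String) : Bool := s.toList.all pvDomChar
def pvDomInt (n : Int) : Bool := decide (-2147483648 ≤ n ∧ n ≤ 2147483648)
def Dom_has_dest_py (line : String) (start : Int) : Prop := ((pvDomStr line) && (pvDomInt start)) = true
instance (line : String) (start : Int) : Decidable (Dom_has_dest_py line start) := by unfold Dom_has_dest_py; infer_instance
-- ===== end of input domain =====

-- B replaces A's single early-exit character scan by str.find position comparisons
-- (position of the equals sign vs the minimum terminator position); a timing run measured B faster (constant factor: C-level find vs a Python-level loop).

-- ===== PORT A =====
-- the for-loop over s with early returns (enumerate index ci is unused)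
def hasDestLoop : List Char → Bool
  | [] => false
  | ch :: rest =>
    if ch = '=' then true
    else if ch ∈ ([' ', '\t', ';', '/'] : List Char) then false
    else hasDestLoop rest

def has_dest_py (line : String) (start : Int) : Bool :=
  hasDestLoop (PySem.List.slice line.toList (some start) none)

-- ===== PORT B =====
-- eq = s.find('='); term = min of s.find(c) over terminators ignoring -1; compare
def hasDestAltCore (s : List Char) : Bool :=
  let eq := PySem.Chars.find s ['=']
  if eq = -1 then false
  else
    let term := ([' ', '\t', ';', '/'] : List Char).foldl
      (fun term c =>
        let p := PySem.Chars.find s [c]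
        if p ≠ -1 ∧ (term = -1 ∨ p < term) then p else term) (-1)
    decide (term = -1 ∨ eq < term)

def has_dest_py_alt (line : String) (start : Int) : Bool :=
  hasDestAltCore (PySem.List.slice line.toList (some start) none)

-- ===== PRECONDITION & SPEC =====
def Spec_has_dest_py (line : String) (start : Int) (out : Bool) : Prop := out = has_dest_py_alt line start
instance (line : String) (start : Int) (out : Bool) : Decidable (Spec_has_dest_py line start out) := by unfold Spec_has_dest_py; infer_instance

-- ===== CLAIM (what is proved, stated in full; the proofs are below) =====
def Claim_equal_has_dest_py : Prop := ∀ (line : String) (start : Int), Dom_has_dest_py line start → Spec_has_dest_py line start (has_dest_py line start)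

-- ===== LEMMAS AND PROOFS =====

theorem singleton_infix_iff_mem (l : List Char) (a : Char) : [a] <:+: l ↔ a ∈ l := by
  constructor
  · intro h; exact h.mem (by simp)
  · intro h
    obtain ⟨i, hi, rfl⟩ := List.mem_iff_getElem.mp h
    exact ⟨l.take i, l.drop (i + 1), by simp⟩

theorem prefix_singleton_drop (s : List Char) (c : Char) (i : Nat) :
    [c] <+: s.drop i ↔ s[i]? = some c := by
  rw [← List.head?_drop]
  constructor
  · rintro ⟨t, ht⟩; rw [← ht]; rfl
  · intro h
    rcases hd : s.drop i with _ | ⟨x, t⟩ <;> rw [hd] at h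
    · simp at h
    · simp at h; exact ⟨t, by simp [h]⟩

theorem find_singleton (s : List Char) (c : Char) :
    PySem.Chars.find s [c] = if c ∈ s then ((s.findIdx (· == c) : Nat) : Int) else -1 := by
  by_cases h : c ∈ s
  · rw [if_pos h]
    have hinf : [c] <:+: s := (singleton_infix_iff_mem s c).mpr h
    have hnon : 0 ≤ PySem.Chars.find s [c] := (PySem.Chars.find_nonneg_iff s [c]).mpr hinf
    obtain ⟨h1, h2⟩ := PySem.Chars.find_spec hnon
    set n := (PySem.Chars.find s [c]).toNat with hn
    have hget : s[n]? = some c := (prefix_singleton_drop s c n).mp h1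
    have hlt : n < s.length := (List.getElem?_eq_some_iff.mp hget).1
    have hval : s[n] = c := by
      have := List.getElem?_eq_some_iff.mp hget; exact this.2
    have hfi : s.findIdx (· == c) = n := by
      rw [List.findIdx_eq hlt]
      refine ⟨by simp [hval], ?_⟩
      intro j hj
      have hj2 := h2 j hj
      rw [prefix_singleton_drop] at hj2
      have hjlt : j < s.length := by omega
      simp only [List.getElem?_eq_getElem hjlt] at hj2
      simp only [beq_eq_false_iff_ne, ne_eq]
      intro hcontra; exact hj2 (by rw [hcontra])
    rw [hfi]; omega
  · rw [if_neg h]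
    exact (PySem.Chars.find_eq_neg_one_iff s [c]).mpr
      (fun hin => h ((singleton_infix_iff_mem s c).mp hin))

-- the common characterisation: '=' occurs and its first index precedes every present terminator's
theorem scan_iff (s : List Char) :
    hasDestLoop s = true ↔
      ('=' ∈ s ∧ ∀ t ∈ ([' ', '\t', ';', '/'] : List Char), t ∈ s →
        s.findIdx (· == '=') < s.findIdx (· == t)) := by
  induction s with
  | nil => simp [hasDestLoop]
  | cons c rest ih =>
    by_cases hc : c = '='
    · subst hc
      have hL : hasDestLoop ('=' :: rest) = true := by simp [hasDestLoop]
      rw [hL]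
      constructor
      · intro _
        refine ⟨List.mem_cons_self, ?_⟩
        intro t ht _
        have hne : ('=' == t) = false := by fin_cases ht <;> decide
        simp [List.findIdx_cons, hne]
      · intro _; rfl
    · by_cases hterm : c ∈ ([' ', '\t', ';', '/'] : List Char)
      · have hL : hasDestLoop (c :: rest) = false := by simp [hasDestLoop, hc, hterm]
        rw [hL]
        simp only [Bool.false_eq_true, false_iff]
        rintro ⟨hmem, hall⟩
        have hlt := hall c hterm List.mem_cons_self
        have hce : (c == '=') = false := by simp [hc]
        simp [List.findIdx_cons, hce] at hlt
      · have hL : hasDestLoop (c :: rest) = hasDestLoop rest := by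
          simp [hasDestLoop, hc, hterm]
        rw [hL, ih]
        have hce : (c == '=') = false := by simp [hc]
        constructor
        · rintro ⟨hmem, hall⟩
          refine ⟨List.mem_cons_of_mem _ hmem, ?_⟩
          intro t ht htm
          have hct : (c == t) = false := by
            simp only [beq_eq_false_iff_ne, ne_eq]
            intro hcontra; exact hterm (hcontra ▸ ht)
          have htm' : t ∈ rest := by
            rcases List.mem_cons.mp htm with h' | h'
            · exact absurd h'.symm (by simpa using hct)
            · exact h'
          have hx := hall t ht htm'
          simp only [List.findIdx_cons, hce, hct, cond_false]
          omega
        · rintro ⟨hmem, hall⟩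
          have hmem' : '=' ∈ rest := by
            rcases List.mem_cons.mp hmem with h' | h'
            · exact absurd h'.symm hc
            · exact h'
          refine ⟨hmem', ?_⟩
          intro t ht htm
          have hct : (c == t) = false := by
            simp only [beq_eq_false_iff_ne, ne_eq]
            intro hcontra; exact hterm (hcontra ▸ ht)
          have hx := hall t ht (List.mem_cons_of_mem _ htm)
          simp only [List.findIdx_cons, hce, hct, cond_false] at hx
          omega

theorem fold_good (eq : Int) (F : Char → Int) (L : List Char) :
    ∀ (acc : Int),
      ((L.foldl (fun a c => if F c ≠ -1 ∧ (a = -1 ∨ F c < a) then F c else a) acc) = -1 ∨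
        eq < (L.foldl (fun a c => if F c ≠ -1 ∧ (a = -1 ∨ F c < a) then F c else a) acc))
      ↔ ((acc = -1 ∨ eq < acc) ∧ ∀ t ∈ L, F t ≠ -1 → eq < F t) := by
  induction L with
  | nil => intro acc; simp
  | cons c L ih =>
    intro acc
    rw [List.foldl_cons, ih]
    have hstep : ((if F c ≠ -1 ∧ (acc = -1 ∨ F c < acc) then F c else acc) = -1 ∨
        eq < (if F c ≠ -1 ∧ (acc = -1 ∨ F c < acc) then F c else acc))
        ↔ ((acc = -1 ∨ eq < acc) ∧ (F c ≠ -1 → eq < F c)) := by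
      split_ifs with h
      · omega
      · rw [not_and] at h
        constructor
        · intro hx
          refine ⟨hx, fun hne => ?_⟩
          have := h hne
          omega
        · intro hx; exact hx.1
    rw [hstep]
    simp only [List.mem_cons]
    constructor
    · rintro ⟨⟨hg, hc⟩, hall⟩
      refine ⟨hg, fun t ht => ?_⟩
      rcases ht with rfl | ht
      · exact hc
      · exact hall t ht
    · rintro ⟨hg, hall⟩
      exact ⟨⟨hg, hall c (Or.inl rfl)⟩, fun t ht => hall t (Or.inr ht)⟩

theorem alt_iff (s : List Char) :
    hasDestAltCore s = true ↔
      ('=' ∈ s ∧ ∀ t ∈ ([' ', '\t', ';', '/'] : List Char), t ∈ s →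
        s.findIdx (· == '=') < s.findIdx (· == t)) := by
  by_cases he : '=' ∈ s
  · have heq : PySem.Chars.find s ['='] = ((s.findIdx (· == '=') : Nat) : Int) := by
      rw [find_singleton, if_pos he]
    have hne : PySem.Chars.find s ['='] ≠ -1 := by rw [heq]; omega
    simp only [hasDestAltCore, if_neg hne, decide_eq_true_eq]
    rw [fold_good (PySem.Chars.find s ['=']) (fun c => PySem.Chars.find s [c])]
    constructor
    · rintro ⟨-, hall⟩
      refine ⟨he, ?_⟩
      intro t ht htm
      have hx := hall t ht
      rw [find_singleton, if_pos htm] at hx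
      have hx2 := hx (by omega)
      rw [heq] at hx2
      exact_mod_cast hx2
    · rintro ⟨-, hall⟩
      refine ⟨by omega, ?_⟩
      intro t ht hne'
      rw [find_singleton s t] at hne'
      by_cases htm : t ∈ s
      · rw [heq, find_singleton s t, if_pos htm]
        exact_mod_cast hall t ht htm
      · rw [if_neg htm] at hne'; exact absurd rfl hne'
  · have heq : PySem.Chars.find s ['='] = -1 := by rw [find_singleton, if_neg he]
    simp [hasDestAltCore, heq, he]

-- ===== VERDICT (by name: the statement is the Claim_ definition above) =====
theorem has_dest_py_spec : Claim_equal_has_dest_py := by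
  intro line start _
  unfold Spec_has_dest_py has_dest_py has_dest_py_alt
  set s := PySem.List.slice line.toList (some start) none
  rw [Bool.eq_iff_iff, scan_iff, alt_iff]
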